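-- pv_equiv track=rewrite | github.com/DanielaSchafer/DiscoBio | Project/fingerprintSDF.py | compareToSecondFold
-- ===== SOURCE A (Python) =====
-- def compareToSecondFold(fingerprintHM, ms,fold2List,extremeVals):
--     for line2 in fold2List:
--                 cols2 = line2.split(" ")
--                 ms2 = cols2[3].rstrip()+" "+cols2[1].rstrip()
--                 if ms2 in fingerprintHM:
--                     sim = fingerprintHM[ms][0] | fingerprintHM[ms2][0]
--                     #simTotal = simTotal +sim
--                     extremeVals[3] = extremeVals[3]+sim
--                     if sim < extremeVals[0]:
--                         #weakestLinkVal = sim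
--                         extremeVals[0] = sim
--                         #weakestLink[0] = ms
--                         #extremeVals[0][1] = ms
--                         #weakestLink[1] = ms2
--                         #extremeVals[0][2] = ms2
--                     if sim > extremeVals[1]:
--                         #strongestLinkVal
--                         extremeVals[1] = sim
--                         #strongestLink
--                         #extremeVals[1][1] = ms
--                         #strongestLink
--                         #extremeVals[1][2] = ms2
--                     #valuesAccountedFor = valuesAccountedFor +1
--                     extremeVals[2] = extremeVals[2]+1
--     return(extremeVals)
-- ===== SOURCE B (Python) =====
-- def compareToSecondFold(fingerprintHM, ms, fold2List, extremeVals):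
--     # Inverted algorithm: instead of scanning the lines and probing the dict per
--     # line, tally how many lines reconstruct each key, then walk the fingerprint
--     # table once, scaling each matched key's contribution by its multiplicity.
--     cnt = {}
--     for line2 in fold2List:
--         c = line2.split(" ")
--         k = c[3].rstrip() + " " + c[1].rstrip()
--         cnt[k] = cnt.get(k, 0) + 1
--     for k in fingerprintHM:
--         m = cnt.get(k, 0)
--         if m:
--             sim = fingerprintHM[ms][0] | fingerprintHM[k][0]
--             if sim < extremeVals[0]:
--                 extremeVals[0] = sim
--             if sim > extremeVals[1]:
--                 extremeVals[1] = sim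
--             extremeVals[2] += m
--             extremeVals[3] += m * sim
--     return extremeVals
-- ===== Notes on version B (the rewrite author's own statement) =====
-- stated objective: alternative
-- what changed: A scans the fold's lines and probes the dict once per line, updating the four accumulators per matching line; B inverts the loops: it first tallies each reconstructed key's multiplicity over the lines, then iterates the fingerprint table itself, updating the extremes once per distinct matched key and scaling count/sum by the key's multiplicity (extremeVals[2] += m, extremeVals[3] += m*sim).
import Mathlib
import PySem

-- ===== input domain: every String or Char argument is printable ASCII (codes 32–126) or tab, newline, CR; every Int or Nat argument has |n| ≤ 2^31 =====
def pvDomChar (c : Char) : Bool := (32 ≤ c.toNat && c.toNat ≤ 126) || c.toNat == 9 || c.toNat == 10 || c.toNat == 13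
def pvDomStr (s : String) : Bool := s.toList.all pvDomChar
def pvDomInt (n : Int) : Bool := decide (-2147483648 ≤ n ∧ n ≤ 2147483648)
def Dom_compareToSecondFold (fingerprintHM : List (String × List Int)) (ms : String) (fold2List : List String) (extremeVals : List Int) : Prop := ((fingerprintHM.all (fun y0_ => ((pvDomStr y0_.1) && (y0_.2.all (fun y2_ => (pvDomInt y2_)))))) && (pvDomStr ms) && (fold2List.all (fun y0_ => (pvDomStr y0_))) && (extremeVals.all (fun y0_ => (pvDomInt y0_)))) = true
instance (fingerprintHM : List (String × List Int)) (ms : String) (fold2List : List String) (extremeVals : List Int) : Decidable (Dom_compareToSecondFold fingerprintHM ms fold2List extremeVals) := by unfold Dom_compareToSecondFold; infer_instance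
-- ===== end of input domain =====

-- B inverts A's loop: it tallies each reconstructed key's multiplicity over the lines, then
-- walks the fingerprint table once, scaling each matched key's contribution by its count;
-- equivalence is about the RETURN value — both Pythons also mutate `extremeVals` in place.

-- the key a line reconstructs (cols[3].rstrip() + " " + cols[1].rstrip()); B's helper, also used by Pre_
def pvKey_compareToSecondFold (line : String) : String :=
  let c := (PySem.Str.split? line " ").getD []          -- sep ≠ "", so split? is always some
  PySem.Str.rstrip (PySem.List.pyGetD c 3 "") ++ " " ++ PySem.Str.rstrip (PySem.List.pyGetD c 1 "")

-- ===== PORT A =====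
-- dict[str, list[int]] is the association list; `k in d` / `d[k]` = first match (List.lookup).
def compareToSecondFold (fingerprintHM : List (String × List Int)) (ms : String) (fold2List : List String) (extremeVals : List Int) : List Int :=
  fold2List.foldl (fun ev line2 =>
    let cols2 := (PySem.Str.split? line2 " ").getD []   -- sep ≠ "", so split? is always some
    let ms2 := PySem.Str.rstrip (PySem.List.pyGetD cols2 3 "") ++ " " ++ PySem.Str.rstrip (PySem.List.pyGetD cols2 1 "")
    match fingerprintHM.lookup ms2 with
    | some v2 =>
        let sim := PySem.Int.bor (PySem.List.pyGetD ((fingerprintHM.lookup ms).getD []) 0 0) (PySem.List.pyGetD v2 0 0)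
        let ev := PySem.List.pySetD ev 3 (PySem.List.pyGetD ev 3 0 + sim)
        let ev := if sim < PySem.List.pyGetD ev 0 0 then PySem.List.pySetD ev 0 sim else ev
        let ev := if PySem.List.pyGetD ev 1 0 < sim then PySem.List.pySetD ev 1 sim else ev
        PySem.List.pySetD ev 2 (PySem.List.pyGetD ev 2 0 + 1)
    | none => ev) extremeVals

-- ===== PORT B =====
-- `for k in fingerprintHM` iterates the dict's distinct keys in first-insertion order:
-- on the association list that is PySem.List.dedup of the key column.
def compareToSecondFold_alt (fingerprintHM : List (String × List Int)) (ms : String) (fold2List : List String) (extremeVals : List Int) : List Int :=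
  let cnt : PySem.Dict String Int := fold2List.foldl (fun d line2 =>
      let k := pvKey_compareToSecondFold line2
      d.insert k (d.getD k 0 + 1)) PySem.Dict.empty
  (PySem.List.dedup (fingerprintHM.map Prod.fst)).foldl (fun ev k =>
      let m := cnt.getD k 0
      if m ≠ 0 then
        let sim := PySem.Int.bor (PySem.List.pyGetD ((fingerprintHM.lookup ms).getD []) 0 0)
                                 (PySem.List.pyGetD ((fingerprintHM.lookup k).getD []) 0 0)
        let ev := if sim < PySem.List.pyGetD ev 0 0 then PySem.List.pySetD ev 0 sim else ev
        let ev := if PySem.List.pyGetD ev 1 0 < sim then PySem.List.pySetD ev 1 sim else ev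
        let ev := PySem.List.pySetD ev 2 (PySem.List.pyGetD ev 2 0 + m)
        PySem.List.pySetD ev 3 (PySem.List.pyGetD ev 3 0 + m * sim)
      else ev) extremeVals

-- ===== PRECONDITION & SPEC =====
-- Pre_ is exactly where the Python A returns: every line must split into ≥ 4 space-columns
-- (else cols2[3] raises IndexError), and whenever some line's key matches, ms must be a key
-- whose fingerprint list is nonempty, the matched key's list nonempty, and len(extremeVals) ≥ 4
-- (else KeyError / IndexError on the first match).
def Pre_compareToSecondFold (fingerprintHM : List (String × List Int)) (ms : String) (fold2List : List String) (extremeVals : List Int) : Prop :=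
  ∀ line ∈ fold2List,
    4 ≤ ((PySem.Str.split? line " ").getD []).length ∧
    ((fingerprintHM.lookup (pvKey_compareToSecondFold line)).isSome →
      (fingerprintHM.lookup (pvKey_compareToSecondFold line)).getD [] ≠ [] ∧
      (fingerprintHM.lookup ms).getD [] ≠ [] ∧
      4 ≤ extremeVals.length)
instance (fingerprintHM : List (String × List Int)) (ms : String) (fold2List : List String) (extremeVals : List Int) : Decidable (Pre_compareToSecondFold fingerprintHM ms fold2List extremeVals) := by unfold Pre_compareToSecondFold; infer_instance

def pvWitness_compareToSecondFold : (List (String × List Int)) × String × List String × List Int :=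
  ([("a b", [3])], "a b", ["x b z a"], [10, 0, 0, 0])

def Spec_compareToSecondFold (fingerprintHM : List (String × List Int)) (ms : String) (fold2List : List String) (extremeVals : List Int) (out : List Int) : Prop := out = compareToSecondFold_alt fingerprintHM ms fold2List extremeVals
instance (fingerprintHM : List (String × List Int)) (ms : String) (fold2List : List String) (extremeVals : List Int) (out : List Int) : Decidable (Spec_compareToSecondFold fingerprintHM ms fold2List extremeVals out) := by unfold Spec_compareToSecondFold; infer_instance

-- ===== CLAIM (what is proved, stated in full; the proofs are below) =====
def Claim_equal_compareToSecondFold : Prop := ∀ (fingerprintHM : List (String × List Int)) (ms : String) (fold2List : List String) (extremeVals : List Int), Dom_compareToSecondFold fingerprintHM ms fold2List extremeVals → Pre_compareToSecondFold fingerprintHM ms fold2List extremeVals → Spec_compareToSecondFold fingerprintHM ms fold2List extremeVals (compareToSecondFold fingerprintHM ms fold2List extremeVals)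

-- ===== LEMMAS AND PROOFS =====

-- the similarity a matched key contributes
def pvSim (fingerprintHM : List (String × List Int)) (ms k : String) : Int :=
  PySem.Int.bor (PySem.List.pyGetD ((fingerprintHM.lookup ms).getD []) 0 0)
                (PySem.List.pyGetD ((fingerprintHM.lookup k).getD []) 0 0)

-- A's per-line update
def pvUpd (ev : List Int) (s : Int) : List Int :=
  let ev1 := PySem.List.pySetD ev 3 (PySem.List.pyGetD ev 3 0 + s)
  let ev2 := if s < PySem.List.pyGetD ev1 0 0 then PySem.List.pySetD ev1 0 s else ev1
  let ev3 := if PySem.List.pyGetD ev2 1 0 < s then PySem.List.pySetD ev2 1 s else ev2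
  PySem.List.pySetD ev3 2 (PySem.List.pyGetD ev3 2 0 + 1)

-- B's per-key update (multiplicity m)
def pvBUpd (ev : List Int) (m s : Int) : List Int :=
  let ev1 := if s < PySem.List.pyGetD ev 0 0 then PySem.List.pySetD ev 0 s else ev
  let ev2 := if PySem.List.pyGetD ev1 1 0 < s then PySem.List.pySetD ev1 1 s else ev1
  let ev3 := PySem.List.pySetD ev2 2 (PySem.List.pyGetD ev2 2 0 + m)
  PySem.List.pySetD ev3 3 (PySem.List.pyGetD ev3 3 0 + m * s)

theorem pvSetD_cons0 (a b c d v : Int) (t : List Int) : PySem.List.pySetD (a::b::c::d::t) 0 v = v::b::c::d::t := by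
  simp [PySem.List.pySetD, PySem.List.pySet?, PySem.List.pyIdx?]
  rw [if_pos (by omega)]
  rfl

theorem pvSetD_cons1 (a b c d v : Int) (t : List Int) : PySem.List.pySetD (a::b::c::d::t) 1 v = a::v::c::d::t := by
  simp [PySem.List.pySetD, PySem.List.pySet?, PySem.List.pyIdx?]
  rw [if_pos (by omega)]
  rfl

theorem pvSetD_cons2 (a b c d v : Int) (t : List Int) : PySem.List.pySetD (a::b::c::d::t) 2 v = a::b::v::d::t := by
  simp [PySem.List.pySetD, PySem.List.pySet?, PySem.List.pyIdx?]
  rw [if_pos (by omega)]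
  rfl

theorem pvSetD_cons3 (a b c d v : Int) (t : List Int) : PySem.List.pySetD (a::b::c::d::t) 3 v = a::b::c::v::t := by
  simp [PySem.List.pySetD, PySem.List.pySet?, PySem.List.pyIdx?]
  rw [if_pos (by omega)]
  rfl

theorem pvGetD_cons0 (a b c d : Int) (t : List Int) : PySem.List.pyGetD (a::b::c::d::t) 0 0 = a := by simp [pysem]
theorem pvGetD_cons1 (a b c d : Int) (t : List Int) : PySem.List.pyGetD (a::b::c::d::t) 1 0 = b := by simp [pysem]
theorem pvGetD_cons2 (a b c d : Int) (t : List Int) : PySem.List.pyGetD (a::b::c::d::t) 2 0 = c := by simp [pysem]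
theorem pvGetD_cons3 (a b c d : Int) (t : List Int) : PySem.List.pyGetD (a::b::c::d::t) 3 0 = d := by simp [pysem]

theorem pvUpd_cons (a b c d s : Int) (t : List Int) :
    pvUpd (a::b::c::d::t) s = (min a s)::(max b s)::(c+1)::(d+s)::t := by
  simp only [pvUpd, pvGetD_cons3, pvSetD_cons3, pvGetD_cons0]
  by_cases h0 : s < a <;>
    simp only [h0, if_true, if_false, pvSetD_cons0, pvGetD_cons1] <;>
    by_cases h1 : b < s <;>
      simp only [h1, if_true, if_false, pvSetD_cons1, pvGetD_cons2, pvSetD_cons2] <;>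
      simp only [List.cons.injEq, and_true] <;>
      omega

theorem pvBUpd_cons (a b c d m s : Int) (t : List Int) :
    pvBUpd (a::b::c::d::t) m s = (min a s)::(max b s)::(c+m)::(d+m*s)::t := by
  simp only [pvBUpd, pvGetD_cons0]
  by_cases h0 : s < a <;>
    simp only [h0, if_true, if_false, pvSetD_cons0, pvGetD_cons1] <;>
    by_cases h1 : b < s <;>
      simp only [h1, if_true, if_false, pvSetD_cons1, pvGetD_cons2, pvSetD_cons2,
        pvGetD_cons3, pvSetD_cons3] <;>
      simp only [List.cons.injEq, and_true] <;>
      omega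

-- the common closed form both folds reach (for a length-≥4 state)
def pvRes (a b c d : Int) (t sims : List Int) : List Int :=
  if sims.isEmpty then a::b::c::d::t
  else (sims.foldl min a)::(sims.foldl max b)::(c + (sims.length : Int))::(d + sims.sum)::t

theorem pvMinRepl (s : Int) : ∀ (j : Nat) (a : Int), List.foldl min a (List.replicate (j+1) s) = min a s := by
  intro j
  induction j with
  | zero => intro a; simp
  | succ j ih =>
      intro a
      rw [List.replicate_succ, List.foldl_cons, ih]
      omega

theorem pvMaxRepl (s : Int) : ∀ (j : Nat) (a : Int), List.foldl max a (List.replicate (j+1) s) = max a s := by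
  intro j
  induction j with
  | zero => intro a; simp
  | succ j ih =>
      intro a
      rw [List.replicate_succ, List.foldl_cons, ih]
      omega

-- absorbing a block of n ≥ 1 copies of s into the closed form
theorem pvRes_repl (a b c d s : Int) (t : List Int) (n : Nat) (hn : n ≠ 0) (l : List Int) :
    pvRes a b c d t (List.replicate n s ++ l) = pvRes (min a s) (max b s) (c + (n : Int)) (d + (n : Int) * s) t l := by
  obtain ⟨j, rfl⟩ : ∃ j, n = j + 1 := ⟨n - 1, by omega⟩
  cases l with
  | nil =>
      rw [List.append_nil]
      simp only [pvRes, List.isEmpty_nil, if_true]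
      rw [if_neg (by simp), pvMinRepl, pvMaxRepl]
      simp only [List.length_replicate, List.sum_replicate, Int.nsmul_eq_mul]
  | cons r rs =>
      simp only [pvRes]
      rw [if_neg (by simp), if_neg (by simp)]
      rw [List.foldl_append, List.foldl_append, pvMinRepl, pvMaxRepl]
      simp only [List.length_append, List.length_replicate, List.sum_append, List.sum_replicate,
        Int.nsmul_eq_mul, List.cons.injEq, and_true]
      exact ⟨trivial, trivial, by push_cast; ring, by ring⟩

theorem pvRes_cons (a b c d s : Int) (t rest : List Int) :
    pvRes a b c d t (s :: rest) = pvRes (min a s) (max b s) (c + 1) (d + s) t rest := by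
  have h := pvRes_repl a b c d s t 1 (by omega) rest
  simpa using h

-- A's fused fold over the (mapped) keys reaches the closed form
theorem pvFoldA (hm : List (String × List Int)) (ms : String) :
    ∀ (ks : List String) (a b c d : Int) (t : List Int),
      ks.foldl (fun ev k => if (hm.lookup k).isSome then pvUpd ev (pvSim hm ms k) else ev) (a::b::c::d::t)
        = pvRes a b c d t ((ks.filter (fun k => (hm.lookup k).isSome)).map (pvSim hm ms)) := by
  intro ks
  induction ks with
  | nil => intro a b c d t; simp [pvRes]
  | cons k ks ih =>
      intro a b c d t
      by_cases hk : (hm.lookup k).isSome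
      · simp only [List.foldl_cons, List.filter_cons, hk, if_true, List.map_cons]
        rw [pvUpd_cons, ih, pvRes_cons]
      · simp only [List.foldl_cons, List.filter_cons, hk, if_false, Bool.false_eq_true]
        exact ih a b c d t

-- B's fold over distinct keys, with multiplicities f, reaches the same closed form on the
-- expansion of each key into its f-many copies
theorem pvFoldB (hm : List (String × List Int)) (ms : String) (f : String → Nat) :
    ∀ (ds : List String) (a b c d : Int) (t : List Int),
      ds.foldl (fun ev k => if ((f k : Int)) ≠ 0 then pvBUpd ev (f k) (pvSim hm ms k) else ev) (a::b::c::d::t)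
        = pvRes a b c d t (ds.flatMap (fun k => List.replicate (f k) (pvSim hm ms k))) := by
  intro ds
  induction ds with
  | nil => intro a b c d t; simp [pvRes]
  | cons k ds ih =>
      intro a b c d t
      by_cases hk : f k = 0
      · simp only [List.foldl_cons, List.flatMap_cons]
        rw [if_neg (by simp [hk]), hk]
        simp only [List.replicate_zero, List.nil_append]
        exact ih a b c d t
      · simp only [List.foldl_cons, List.flatMap_cons]
        rw [if_pos (by simpa using hk), pvBUpd_cons, ih, pvRes_repl _ _ _ _ _ _ _ hk]

-- the closed form only sees the multiset of similarities
theorem pvRes_perm (a b c d : Int) (t : List Int) {s1 s2 : List Int} (h : s1.Perm s2) :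
    pvRes a b c d t s1 = pvRes a b c d t s2 := by
  simp only [pvRes, List.isEmpty_iff_length_eq_zero, h.length_eq, h.sum_eq]
  split_ifs with he
  · rfl
  · rw [List.Perm.foldl_op_eq h, List.Perm.foldl_op_eq h]

-- counting in the key-expansion of a duplicate-free list
theorem pvCountFlat (f : String → Nat) (x : String) :
    ∀ (ds : List String), ds.Nodup →
      (ds.flatMap (fun k => List.replicate (f k) k)).count x = if x ∈ ds then f x else 0 := by
  intro ds
  induction ds with
  | nil => intro _; simp
  | cons k ds ih =>
      intro hnd
      rw [List.nodup_cons] at hnd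
      simp only [List.flatMap_cons, List.count_append, List.count_replicate, ih hnd.2, List.mem_cons]
      by_cases hx : x = k
      · subst hx
        simp [hnd.1]
      · simp [hx, Ne.symm hx]

-- membership in the key column decides the lookup
theorem pvLookupMem (x : String) : ∀ (hm : List (String × List Int)),
    (hm.lookup x).isSome = true ↔ x ∈ hm.map Prod.fst := by
  intro hm
  induction hm with
  | nil => simp [List.lookup]
  | cons p hm ih =>
      cases p with
      | mk k v =>
          by_cases hx : x = k
          · subst hx; simp [List.lookup]
          · have hl : List.lookup x ((k, v) :: hm) = List.lookup x hm := by
              simp [List.lookup, beq_false_of_ne hx]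
            rw [hl, List.map_cons]
            rw [ih]
            simp [hx]

-- the matched lines' keys, as a multiset, are the distinct matched keys with their multiplicities
theorem pvPermKeys (hm : List (String × List Int)) (keys : List String) :
    (keys.filter (fun k => (hm.lookup k).isSome)).Perm
      ((PySem.List.dedup (hm.map Prod.fst)).flatMap (fun k => List.replicate (keys.count k) k)) := by
  rw [List.perm_iff_count]
  intro x
  rw [pvCountFlat _ x _ (PySem.List.nodup_dedup _)]
  by_cases hx : (hm.lookup x).isSome
  · rw [List.count_filter (p := fun k => (hm.lookup k).isSome) (a := x) (l := keys) (by simpa using hx),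
      if_pos ((PySem.List.mem_dedup _ x).mpr ((pvLookupMem x hm).mp hx))]
  · rw [if_neg (fun hmem => hx ((pvLookupMem x hm).mpr ((PySem.List.mem_dedup _ x).mp hmem)))]
    rw [List.count_eq_zero]
    intro hmem
    exact hx (by simpa using (List.mem_filter.mp hmem).2)

-- A's fold step, rewritten through pvKey/pvSim
theorem pvA_eq (hm : List (String × List Int)) (ms : String) (fl : List String) (ev : List Int) :
    compareToSecondFold hm ms fl ev
      = (fl.map pvKey_compareToSecondFold).foldl
          (fun ev k => if (hm.lookup k).isSome then pvUpd ev (pvSim hm ms k) else ev) ev := by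
  unfold compareToSecondFold
  rw [List.foldl_map]
  apply PySem.List.foldl_congr_mem
  intro ev' l _
  simp only [pvSim, pvUpd, pvKey_compareToSecondFold]
  cases h : List.lookup (PySem.Str.rstrip (PySem.List.pyGetD ((PySem.Str.split? l " ").getD []) 3 "") ++ " " ++ PySem.Str.rstrip (PySem.List.pyGetD ((PySem.Str.split? l " ").getD []) 1 "")) hm with
  | none => rfl
  | some v2 => rfl

-- B's counter really is the multiplicity of each key among the lines
theorem pvCntGetD (fl : List String) (k : String) :
    (fl.foldl (fun d line2 =>
        d.insert (pvKey_compareToSecondFold line2)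
          (d.getD (pvKey_compareToSecondFold line2) 0 + 1)) PySem.Dict.empty).getD k 0
      = (((fl.map pvKey_compareToSecondFold).count k : Nat) : Int) := by
  rw [← List.foldl_map (f := pvKey_compareToSecondFold)
        (g := fun (d : PySem.Dict String Int) k => d.insert k (d.getD k 0 + 1))]
  rw [PySem.Dict.getD_foldl_insert_add_one]
  simp [PySem.Dict.getD_empty]

-- B, rewritten as the fold over the distinct keys with count-based multiplicities
theorem pvB_eq (hm : List (String × List Int)) (ms : String) (fl : List String) (ev : List Int) :
    compareToSecondFold_alt hm ms fl ev
      = (PySem.List.dedup (hm.map Prod.fst)).foldl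
          (fun ev k => if ((((fl.map pvKey_compareToSecondFold).count k : Nat) : Int)) ≠ 0
            then pvBUpd ev ((fl.map pvKey_compareToSecondFold).count k) (pvSim hm ms k) else ev) ev := by
  unfold compareToSecondFold_alt
  apply PySem.List.foldl_congr_mem
  intro ev' k _
  simp only [pvCntGetD, pvSim, pvBUpd]

-- with no matched line both folds return the untouched input
theorem pvNoMatchA (hm : List (String × List Int)) (ms : String) (ks : List String) (ev : List Int)
    (h : ∀ k ∈ ks, (hm.lookup k).isSome = false) :
    ks.foldl (fun ev k => if (hm.lookup k).isSome then pvUpd ev (pvSim hm ms k) else ev) ev = ev := by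
  induction ks generalizing ev with
  | nil => rfl
  | cons k ks ih =>
      simp only [List.foldl_cons, h k (by simp), Bool.false_eq_true, if_false]
      exact ih ev (fun x hx => h x (by simp [hx]))

theorem pvNoMatchB (hm : List (String × List Int)) (ms : String) (f : String → Nat)
    (ds : List String) (ev : List Int) (h : ∀ k ∈ ds, f k = 0) :
    ds.foldl (fun ev k => if ((f k : Int)) ≠ 0 then pvBUpd ev (f k) (pvSim hm ms k) else ev) ev = ev := by
  induction ds generalizing ev with
  | nil => rfl
  | cons k ds ih =>
      simp only [List.foldl_cons, h k (by simp), Nat.cast_zero, ne_eq, not_true_eq_false, if_false]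
      exact ih ev (fun x hx => h x (by simp [hx]))

-- ===== VERDICT (by name: the statement is the Claim_ definition above) =====
theorem compareToSecondFold_spec : Claim_equal_compareToSecondFold := by
  intro hm ms fl ev _ hpre
  unfold Spec_compareToSecondFold
  rw [pvA_eq, pvB_eq]
  by_cases hex : ∃ l ∈ fl, (hm.lookup (pvKey_compareToSecondFold l)).isSome = true
  · obtain ⟨l, hl, hsome⟩ := hex
    have hlen : 4 ≤ ev.length := ((hpre l hl).2 hsome).2.2
    rcases ev with _ | ⟨a, _ | ⟨b, _ | ⟨c, _ | ⟨d, t⟩⟩⟩⟩ <;> simp at hlen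
    rw [pvFoldA, pvFoldB]
    exact pvRes_perm a b c d t
      (by simpa [List.map_flatMap, List.map_replicate] using
        (pvPermKeys hm (fl.map pvKey_compareToSecondFold)).map (pvSim hm ms))
  · have hall : ∀ k ∈ fl.map pvKey_compareToSecondFold, (hm.lookup k).isSome = false := by
      intro k hk
      obtain ⟨l, hl, rfl⟩ := List.mem_map.mp hk
      cases hs : (hm.lookup (pvKey_compareToSecondFold l)).isSome with
      | false => rfl
      | true => exact absurd ⟨l, hl, hs⟩ hex
    rw [pvNoMatchA hm ms _ ev hall]
    rw [pvNoMatchB hm ms _ _ ev ?_]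
    intro k hk
    by_contra hne
    have hmem : k ∈ fl.map pvKey_compareToSecondFold :=
      List.count_pos_iff.mp (by omega)
    have := hall k hmem
    rw [(pvLookupMem k hm).mpr (by simpa using (PySem.List.mem_dedup _ k).mp hk)] at this
    exact Bool.true_eq_false.mp this
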